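-- pv_equiv track=rewrite | github.com/GizawAAiT/Codeforces | A_United_We_Stand.py | solve
-- ===== SOURCE A (Python) =====
-- def solve(n: int, a: list[int]):
--
--     a.sort()
--
--     if a[0] == a[-1]:
--         return -1
--
--     b, c = [], []
--     for num in a:
--         if num == a[-1]:
--             c.append(num)
--         else:
--             b.append(num)
--
--     return [b, c]
-- ===== SOURCE B (Python) =====
-- def solve(n: int, a: list[int]):
--     a.sort()
--     if a[0] == a[-1]:
--         return -1
--     m = a[-1]
--     lo, hi = 0, len(a)
--     while lo < hi:
--         mid = (lo + hi) // 2
--         if a[mid] < m: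
--             lo = mid + 1
--         else:
--             hi = mid
--     return [a[:lo], a[lo:]]
-- ===== Notes on version B (the rewrite author's own statement) =====
-- stated objective: alternative
-- what changed: Replaces A's linear classify-each-element loop (appending into two lists) with a hand-written bisect_left binary search for the boundary of the maximal suffix of the sorted array, returning the two slices; the in-place sort is kept so the argument is mutated identically.
-- outside the precondition, e.g. on solve(1, [5]): A returns -1, B returns -1; on solve(0, []): A raises IndexError, B raises IndexError
import Mathlib
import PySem

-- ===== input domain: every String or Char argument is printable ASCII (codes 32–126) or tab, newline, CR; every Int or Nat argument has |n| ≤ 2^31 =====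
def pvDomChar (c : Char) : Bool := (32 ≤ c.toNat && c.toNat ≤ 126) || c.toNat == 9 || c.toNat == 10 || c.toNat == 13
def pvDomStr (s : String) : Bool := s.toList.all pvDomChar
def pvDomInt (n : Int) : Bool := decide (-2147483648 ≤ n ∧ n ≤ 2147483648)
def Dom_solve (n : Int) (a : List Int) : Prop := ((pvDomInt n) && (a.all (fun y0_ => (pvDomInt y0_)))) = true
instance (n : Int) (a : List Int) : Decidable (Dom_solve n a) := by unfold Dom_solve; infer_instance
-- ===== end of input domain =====

-- B replaces A's linear classify-each-element loop with a hand-written bisect_left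
-- binary search for the boundary of the maximal suffix of the sorted array, then slices;
-- both sort the argument in place (equivalence proved about the RETURN value; the mutation is identical).


-- ===== PORT A =====
def solve (n : Int) (a : List Int) : Option (List (List Int)) :=
  let s := PySem.List.sorted a (fun x => x) false
  match PySem.List.pyGet? s 0, PySem.List.pyGet? s (-1) with
  | some x0, some xl =>
    if x0 == xl then none   -- Python A returns -1 here (outside the declared return type; excluded by Pre_)
    else
      let bc := s.foldl (fun (p : List Int × List Int) num =>
        if some num == PySem.List.pyGet? s (-1) then (p.1, p.2 ++ [num]) else (p.1 ++ [num], p.2))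
        ([], [])
      some [bc.1, bc.2]
  | _, _ => none            -- IndexError on the empty list (excluded by Pre_)

-- ===== PORT B =====
-- the hand-written bisect_left while-loop of Source B; fuel bounds the iterations (hi - lo shrinks each step)
def bisectLoop (s : List Int) (m : Int) (lo hi : Int) : Nat → Int
  | 0 => lo
  | fuel + 1 =>
    if lo < hi then
      let mid := PySem.Int.floordiv (lo + hi) 2
      if PySem.List.pyGetD s mid 0 < m then bisectLoop s m (mid + 1) hi fuel
      else bisectLoop s m lo mid fuel
    else lo

def solve_alt (n : Int) (a : List Int) : Option (List (List Int)) :=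
  let s := PySem.List.sorted a (fun x => x) false
  match PySem.List.pyGet? s 0 with
  | none => none
  | some x0 =>
    match PySem.List.pyGet? s (-1) with
    | none => none
    | some m =>
      if x0 == m then none
      else
        let lo := bisectLoop s m 0 (s.length : Int) (s.length + 1)
        some [PySem.List.slice s none (some lo), PySem.List.slice s (some lo) none]

-- ===== PRECONDITION & SPEC =====
-- Pre_ excludes the empty list, where A raises IndexError, and lists whose elements are all
-- equal, where A returns -1, which is not a value of the declared return type Optional[list[list[int]]].
def Pre_solve (n : Int) (a : List Int) : Prop := a ≠ [] ∧ ∃ x ∈ a, ∃ y ∈ a, x ≠ y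
instance (n : Int) (a : List Int) : Decidable (Pre_solve n a) := by unfold Pre_solve; infer_instance
def pvWitness_solve : Int × List Int := (2, [1, 2])

def Spec_solve (n : Int) (a : List Int) (out : Option (List (List Int))) : Prop := out = solve_alt n a
instance (n : Int) (a : List Int) (out : Option (List (List Int))) : Decidable (Spec_solve n a out) := by unfold Spec_solve; infer_instance

-- ===== CLAIM (what is proved, stated in full; the proofs are below) =====
def Claim_equal_solve : Prop := ∀ (n : Int) (a : List Int), Dom_solve n a → Pre_solve n a → Spec_solve n a (solve n a)

-- ===== LEMMAS AND PROOFS =====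

lemma getElem_mono_of_pairwise (s : List Int) (hs : s.Pairwise (· ≤ ·))
    {i j : Nat} (hij : i ≤ j) (hj : j < s.length) :
    s[i]'(lt_of_le_of_lt hij hj) ≤ s[j] := by
  rcases lt_or_eq_of_le hij with h | h
  · exact List.pairwise_iff_getElem.mp hs i j (lt_of_le_of_lt hij hj) hj h
  · subst h; exact le_refl _

lemma bisectLoop_spec (s : List Int) (hs : s.Pairwise (· ≤ ·)) (m : Int) :
    ∀ (fuel : Nat) (lo hi : Int),
      0 ≤ lo → lo ≤ hi → hi ≤ (s.length : Int) → hi - lo < (fuel : Int) →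
      (∀ (j : Nat) (hj : j < s.length), (j : Int) < lo → s[j] < m) →
      (∀ (j : Nat) (hj : j < s.length), hi ≤ (j : Int) → m ≤ s[j]) →
      ∃ k : Nat, bisectLoop s m lo hi fuel = (k : Int) ∧ k ≤ s.length ∧
        (∀ (j : Nat) (hj : j < s.length), j < k → s[j] < m) ∧
        (∀ (j : Nat) (hj : j < s.length), k ≤ j → m ≤ s[j]) := by
  intro fuel
  induction fuel with
  | zero => intro lo hi h0 hlh _ hf _ _; omega
  | succ fuel ih =>
    intro lo hi h0 hlh hhl hf hlo hhi
    by_cases hlt : lo < hi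
    · have hmid := PySem.Int.floordiv_two_mid_bounds (lo := lo) (hi := hi) hlh
      set mid := PySem.Int.floordiv (lo + hi) 2 with hmiddef
      have hmidlt : mid < hi := by
        have := PySem.Int.floordiv_lt_iff_lt_mul (a := lo + hi) (b := 2) (q := hi) (by omega)
        omega
      have hmidnn : 0 ≤ mid := by omega
      have hmidlen : mid < (s.length : Int) := by omega
      have hget : PySem.List.pyGetD s mid 0 = s[mid.toNat]'(by omega) :=
        PySem.List.pyGetD_eq_getElem _ _ hmidnn hmidlen
      simp only [bisectLoop, if_pos hlt, ← hmiddef, hget]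
      by_cases hc : s[mid.toNat]'(by omega) < m
      · rw [if_pos hc]
        refine ih (mid + 1) hi (by omega) (by omega) hhl (by omega) ?_ hhi
        intro j hj hjlt
        have hjle : j ≤ mid.toNat := by omega
        exact lt_of_le_of_lt (getElem_mono_of_pairwise s hs hjle (by omega)) hc
      · rw [if_neg hc]
        refine ih lo mid (by omega) (by omega) (by omega) (by omega) hlo ?_
        intro j hj hjge
        have : mid.toNat ≤ j := by omega
        exact le_trans (not_lt.mp hc) (getElem_mono_of_pairwise s hs this hj)
    · refine ⟨lo.toNat, ?_, by omega, ?_, ?_⟩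
      · simp only [bisectLoop, if_neg hlt]; omega
      · intro j hj hjlt; exact hlo j hj (by omega)
      · intro j hj hjge; exact hhi j hj (by omega)

lemma foldl_partition (l : List Int) (m : Int) (b c : List Int) :
    l.foldl (fun (p : List Int × List Int) num =>
        if num = m then (p.1, p.2 ++ [num]) else (p.1 ++ [num], p.2)) (b, c)
      = (b ++ l.filter (fun x => !(x == m)), c ++ l.filter (fun x => x == m)) := by
  induction l generalizing b c with
  | nil => simp
  | cons x xs ih =>
    by_cases hx : x = m
    · rw [List.foldl_cons, if_pos hx, ih]; simp [hx]
    · rw [List.foldl_cons, if_neg hx, ih]; simp [hx]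

-- ===== VERDICT (by name: the statement is the Claim_ definition above) =====
theorem solve_spec : Claim_equal_solve := by
  intro n a _ _
  unfold Spec_solve solve solve_alt
  set s := PySem.List.sorted a (fun x => x) false with hsdef
  have hs : s.Pairwise (· ≤ ·) := PySem.List.sorted_pairwise a (fun x => x)
  cases h0 : PySem.List.pyGet? s 0 with
  | none =>
    cases h1 : PySem.List.pyGet? s (-1) with
    | none => simp only [h0, h1]
    | some m => simp only [h0, h1]
  | some x0 =>
    cases h1 : PySem.List.pyGet? s (-1) with
    | none => simp only [h0, h1]
    | some m =>
      simp only [h0, h1]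
      by_cases hx : x0 = m
      · simp [hx]
      · have hxb : (x0 == m) = false := by simpa using hx
        simp only [hxb, Bool.false_eq_true, if_false, Option.some.injEq]
        -- the loop's a[-1] lookup is constantly m
        have hfun : (fun (p : List Int × List Int) num =>
            if some num == some m then (p.1, p.2 ++ [num]) else (p.1 ++ [num], p.2))
            = (fun (p : List Int × List Int) num =>
            if num = m then (p.1, p.2 ++ [num]) else (p.1 ++ [num], p.2)) := by
          funext p num
          simp
        rw [hfun, foldl_partition]
        -- every element of s is ≤ m (m is the last element of the sorted list)
        have hub : ∀ (j : Nat) (hj : j < s.length), s[j] ≤ m := by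
          have hml : s.getLast? = some m := by
            rw [← PySem.List.pyGet?_neg_one]; exact h1
          intro j hj
          have hlast : s[s.length - 1]'(by omega) = m := by
            have hgl := List.getLast?_eq_getElem? (l := s)
            rw [hml] at hgl
            have h2 := List.getElem?_eq_getElem (l := s) (i := s.length - 1) (by omega)
            rw [h2] at hgl
            exact (Option.some_inj.mp hgl.symm)
          calc s[j] ≤ s[s.length - 1]'(by omega) :=
                  getElem_mono_of_pairwise s hs (by omega) (by omega)
            _ = m := hlast
        obtain ⟨k, hk, hkle, hlt, hge⟩ :=
          bisectLoop_spec s hs m (s.length + 1) 0 (s.length : Int)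
            (by omega) (by omega) (by omega) (by push_cast; omega)
            (by intro j hj hjlt; omega)
            (by intro j hj hjge; omega)
        rw [hk, PySem.List.slice_to_natCast, PySem.List.slice_from_natCast]
        have htd := List.take_append_drop k s
        have hfilt1 : s.filter (fun x => !(x == m)) = s.take k := by
          conv_lhs => rw [← htd]
          rw [List.filter_append]
          have ha : (s.take k).filter (fun x => !(x == m)) = s.take k := by
            rw [List.filter_eq_self]
            intro x hx
            obtain ⟨i, hi, hxi⟩ := List.mem_take_iff_getElem.mp hx
            have : s[i]'(by omega) < m := hlt i (by omega) (by omega)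
            simp only [← hxi]
            simpa using ne_of_lt this
          have hb : (s.drop k).filter (fun x => !(x == m)) = [] := by
            rw [List.filter_eq_nil_iff]
            intro x hx
            obtain ⟨i, hi, hxi⟩ := List.mem_drop_iff_getElem.mp hx
            have hge' : m ≤ s[k + i]'(by omega) := hge (k + i) (by omega) (by omega)
            have hub' : s[k + i]'(by omega) ≤ m := hub (k + i) (by omega)
            have : x = m := by rw [← hxi]; omega
            simp [this]
          rw [ha, hb, List.append_nil]
        have hfilt2 : s.filter (fun x => x == m) = s.drop k := by
          conv_lhs => rw [← htd]
          rw [List.filter_append]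
          have ha : (s.take k).filter (fun x => x == m) = [] := by
            rw [List.filter_eq_nil_iff]
            intro x hx
            obtain ⟨i, hi, hxi⟩ := List.mem_take_iff_getElem.mp hx
            have : s[i]'(by omega) < m := hlt i (by omega) (by omega)
            rw [← hxi]
            simpa using ne_of_lt this
          have hb : (s.drop k).filter (fun x => x == m) = s.drop k := by
            rw [List.filter_eq_self]
            intro x hx
            obtain ⟨i, hi, hxi⟩ := List.mem_drop_iff_getElem.mp hx
            have hge' : m ≤ s[k + i]'(by omega) := hge (k + i) (by omega) (by omega)
            have hub' : s[k + i]'(by omega) ≤ m := hub (k + i) (by omega)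
            have : x = m := by rw [← hxi]; omega
            simp [this]
          rw [ha, hb, List.nil_append]
        simp [hfilt1, hfilt2]
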